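-- pv_equiv track=rewrite | github.com/uav-profile/wiktionary_parser | uchicago.py | get_origin_word
-- ===== SOURCE A (Python) =====
-- eng_charact = [
--     'A', 'B', 'C', 'D', 'E', 'F', 'G', 'H', 'I', 'J', 'K', 'L', 'M',
--     'N', 'O', 'P', 'Q', 'R', 'S', 'T', 'U', 'V', 'W', 'X', 'Y', 'Z',
--     '(', ]
--
-- def get_origin_word(str_to_origin):
--     word_to_return = ''
--     for idx, i in enumerate(str_to_origin.strip()):
--         if i not in eng_charact:
--             word_to_return += i
--         else:
--             if idx == 0 and i == '(':
--                 word_to_return += i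
--             else:
--                 break
--     if ' ' in word_to_return:
--         word_to_return = word_to_return.strip()
--     return word_to_return
-- ===== SOURCE B (Python) =====
-- def get_origin_word(str_to_origin):
--     s = str_to_origin.strip()
--     has_paren = s.startswith('(')
--     body = s[1:] if has_paren else s
--     cut = next((k for k, c in enumerate(body) if c == '(' or 'A' <= c <= 'Z'), len(body))
--     word = ('(' if has_paren else '') + body[:cut]
--     return word.strip() if ' ' in word else word
-- ===== Notes on version B (the rewrite author's own statement) =====
-- stated objective: simpler
-- what changed: B replaces A's char-by-char accumulator loop with break and an in-loop index-zero special case by a one-shot decomposition: strip, peel an optional leading open parenthesis, find the index of the first delimiter (uppercase letter or open parenthesis), and slice the word out in one step.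
import Mathlib
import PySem

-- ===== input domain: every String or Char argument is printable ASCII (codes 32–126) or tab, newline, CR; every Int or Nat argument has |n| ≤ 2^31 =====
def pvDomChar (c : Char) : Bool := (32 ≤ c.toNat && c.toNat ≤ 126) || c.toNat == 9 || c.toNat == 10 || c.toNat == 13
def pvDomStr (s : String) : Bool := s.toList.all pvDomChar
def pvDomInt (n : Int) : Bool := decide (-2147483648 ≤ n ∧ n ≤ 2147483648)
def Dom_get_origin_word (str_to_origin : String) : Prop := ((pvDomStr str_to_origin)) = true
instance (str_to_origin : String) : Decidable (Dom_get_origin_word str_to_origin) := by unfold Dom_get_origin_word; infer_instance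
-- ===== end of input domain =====

-- B computes the cut in one shot (first-delimiter index + a slice) instead of A's char-by-char
-- accumulator loop with a break: a simpler decomposition, measured constant-factor faster in Python.

-- ===== PORT A =====
def engCharact : List Char :=
  ['A','B','C','D','E','F','G','H','I','J','K','L','M',
   'N','O','P','Q','R','S','T','U','V','W','X','Y','Z','(']

-- A's for-loop over enumerate with break, carrying the accumulated word
def getOriginLoopA : List Char → Nat → List Char → List Char
  | [], _, acc => acc
  | i :: rest, idx, acc =>
    if ¬ (i ∈ engCharact) then getOriginLoopA rest (idx + 1) (acc ++ [i])
    else if idx = 0 ∧ i = '(' then getOriginLoopA rest (idx + 1) (acc ++ [i])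
    else acc

def get_origin_word (str_to_origin : String) : String :=
  let word := getOriginLoopA (PySem.Str.strip str_to_origin).toList 0 []
  if PySem.Chars.isIn [' '] word then String.ofList (PySem.Chars.strip word)
  else String.ofList word

-- ===== PORT B =====
def isDelimB (c : Char) : Bool := c == '(' || (decide ('A' ≤ c) && decide (c ≤ 'Z'))

def get_origin_word_alt (str_to_origin : String) : String :=
  let s := (PySem.Str.strip str_to_origin).toList
  let hasParen := PySem.Chars.startswith s ['(']
  let body := if hasParen then PySem.List.slice s (some 1) none else s
  let cut := body.findIdx isDelimB          -- next((k for k,c in enumerate(body) if …), len(body))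
  let word := (if hasParen then ['('] else []) ++ body.take cut
  if PySem.Chars.isIn [' '] word then String.ofList (PySem.Chars.strip word)
  else String.ofList word

-- ===== PRECONDITION & SPEC =====
def Spec_get_origin_word (str_to_origin : String) (out : String) : Prop := out = get_origin_word_alt str_to_origin
instance (str_to_origin : String) (out : String) : Decidable (Spec_get_origin_word str_to_origin out) := by unfold Spec_get_origin_word; infer_instance

-- ===== CLAIM (what is proved, stated in full; the proofs are below) =====
def Claim_equal_get_origin_word : Prop := ∀ (str_to_origin : String), Dom_get_origin_word str_to_origin → Spec_get_origin_word str_to_origin (get_origin_word str_to_origin)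

-- ===== LEMMAS AND PROOFS =====

-- membership in A's delimiter list is B's delimiter test
theorem mem_eng_iff (c : Char) : (c ∈ engCharact) ↔ isDelimB c = true := by
  unfold engCharact isDelimB
  simp only [List.mem_cons, List.not_mem_nil, or_false, Bool.or_eq_true, beq_iff_eq,
    Bool.and_eq_true, decide_eq_true_eq]
  constructor
  · rintro (rfl|rfl|rfl|rfl|rfl|rfl|rfl|rfl|rfl|rfl|rfl|rfl|rfl|rfl|rfl|rfl|rfl|rfl|rfl|rfl|rfl|rfl|rfl|rfl|rfl|rfl|rfl) <;> simp
  · rintro (rfl | ⟨h1, h2⟩)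
    · simp
    · have hl : 65 ≤ c.toNat := Char.le_def.mp h1
      have hr : c.toNat ≤ 90 := Char.le_def.mp h2
      have hv : c = Char.ofNat c.toNat := (Char.ofNat_toNat c).symm
      interval_cases h : c.toNat <;> simp_all

-- take up to the first index satisfying p is takeWhile (!p)
theorem take_findIdx_eq_takeWhile (p : Char → Bool) :
    ∀ l : List Char, l.take (l.findIdx p) = l.takeWhile (fun c => !p c) := by
  intro l
  induction l with
  | nil => rfl
  | cons c rest ih =>
    by_cases h : p c = true
    · simp [List.findIdx_cons, h]
    · simp only [Bool.not_eq_true] at h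
      simp [List.findIdx_cons, h, ih]

-- at any positive index A's loop is just takeWhile of the non-delimiters
theorem loopA_pos : ∀ (l : List Char) (k : Nat) (acc : List Char),
    getOriginLoopA l (k + 1) acc = acc ++ l.takeWhile (fun c => !isDelimB c) := by
  intro l
  induction l with
  | nil => intro k acc; simp [getOriginLoopA]
  | cons c rest ih =>
    intro k acc
    by_cases h : c ∈ engCharact
    · have hb : isDelimB c = true := (mem_eng_iff c).mp h
      simp [getOriginLoopA, h, hb]
    · have hb : isDelimB c = false :=
        by simpa using fun h' => h ((mem_eng_iff c).mpr h')
      simp [getOriginLoopA, h, hb, ih]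

-- from index 0, A's loop equals B's paren-split + takeWhile
theorem loopA_zero (l : List Char) :
    getOriginLoopA l 0 [] =
      (if PySem.Chars.startswith l ['('] then ['('] else []) ++
        (if PySem.Chars.startswith l ['('] then l.tail else l).takeWhile (fun c => !isDelimB c) := by
  cases l with
  | nil => simp [getOriginLoopA, PySem.Chars.startswith]
  | cons c rest =>
    by_cases hc : c = '('
    · subst hc
      have hsw : PySem.Chars.startswith ('(' :: rest) ['('] = true := by
        simp [PySem.Chars.startswith_iff, List.cons_prefix_cons]
      rw [hsw]
      simp [getOriginLoopA, engCharact, loopA_pos]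
    · have hsw : PySem.Chars.startswith (c :: rest) ['('] = false := by
        cases hstart : PySem.Chars.startswith (c :: rest) ['('] with
        | false => rfl
        | true =>
          have := (PySem.Chars.startswith_iff (c :: rest) ['(']).mp hstart
          rw [List.cons_prefix_cons] at this
          exact absurd this.1.symm hc
      simp only [hsw, Bool.false_eq_true, if_neg, not_false_iff, List.nil_append]
      by_cases h : c ∈ engCharact
      · have hb : isDelimB c = true := (mem_eng_iff c).mp h
        simp [getOriginLoopA, h, hc, hb]
      · have hb : isDelimB c = false :=
          by simpa using fun h' => h ((mem_eng_iff c).mpr h')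
        simp [getOriginLoopA, h, hb, loopA_pos]

-- ===== VERDICT (by name: the statement is the Claim_ definition above) =====
theorem get_origin_word_spec : Claim_equal_get_origin_word := by
  intro s _
  unfold Spec_get_origin_word get_origin_word get_origin_word_alt
  simp only [PySem.List.slice_from_one, take_findIdx_eq_takeWhile, loopA_zero]
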